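-- pv_equiv track=rewrite | github.com/megumin123578/upload-short-automatic | test_upload_short/1.py | next_slots
-- ===== SOURCE A (Python) =====
-- def next_slots(slots: str, count: int) -> list:
--     base = [s.strip() for s in (slots or '').split('|') if s.strip()]
--     if not base:
--         base = ['03:00 AM','09:00 AM','07:00 PM']
--     out = []
--     i = 0
--     while len(out) < count:
--         out.append(base[i % len(base)])
--         i += 1
--     return out
-- ===== SOURCE B (Python) =====
-- def next_slots(slots: str, count: int) -> list:
--     base = [s.strip() for s in (slots or '').split('|') if s.strip()]
--     if not base:
--         base = ['03:00 AM','09:00 AM','07:00 PM']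
--     n = count if count > 0 else 0
--     return base * (n // len(base)) + base[:n % len(base)]
-- ===== Notes on version B (the rewrite author's own statement) =====
-- stated objective: simpler
-- what changed: Replaces the element-by-element while loop over a running index with a closed-form construction: full repetitions by list multiplication plus a prefix slice for the remainder, after clamping non-positive counts to 0.
import Mathlib
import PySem

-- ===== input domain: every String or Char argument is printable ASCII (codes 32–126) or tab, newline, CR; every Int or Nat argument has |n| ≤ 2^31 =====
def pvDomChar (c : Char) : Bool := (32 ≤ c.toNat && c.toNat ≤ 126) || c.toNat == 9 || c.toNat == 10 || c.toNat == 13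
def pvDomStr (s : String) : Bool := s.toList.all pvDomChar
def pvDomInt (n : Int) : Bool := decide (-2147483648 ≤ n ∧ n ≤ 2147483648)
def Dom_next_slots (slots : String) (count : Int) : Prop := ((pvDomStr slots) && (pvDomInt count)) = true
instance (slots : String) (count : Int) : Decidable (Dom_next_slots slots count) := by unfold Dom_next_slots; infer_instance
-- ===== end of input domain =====

-- B replaces A's element-by-element while loop with the closed form
-- base * (n // len(base)) + base[:n % len(base)] (objective: simpler); same return value.

-- ===== PORT A =====
-- the while loop: out grows by one element per iteration; i is the running index.
-- The loop runs at most count.toNat times (each iteration appends one element), so it is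
-- ported as the obvious structural recursion on that iteration bound (fuel), with the
-- Python loop condition len(out) < count tested unchanged on the same state.
-- base[i % len(base)] is ported as getD: since base ≠ [] and i % base.length < base.length,
-- the index is always in range, so getD is exact (Python never raises here).
def nextSlotsLoopA (base : List String) (count : Int) (fuel : Nat) (out : List String)
    (i : Nat) : List String :=
  match fuel with
  | 0 => out
  | fuel + 1 =>
    if (out.length : Int) < count then
      nextSlotsLoopA base count fuel (out ++ [base.getD (i % base.length) ""]) (i + 1)
    else out

-- [s.strip() for s in (slots or '').split('|') if s.strip()] is ported as map-then-filter
-- (filter by nonempty strip, keep the stripped value — the same multiset of operations).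
-- (slots or '') = slots when nonempty, '' when empty; ''.split('|') = [''] = splitOn '' '|',
-- so splitting slots directly is exact.
def next_slots (slots : String) (count : Int) : List String :=
  let base := (((PySem.Str.split? slots "|").getD []).map PySem.Str.strip).filter (fun s => !(s == ""))
  let base := if base = [] then ["03:00 AM", "09:00 AM", "07:00 PM"] else base
  nextSlotsLoopA base count count.toNat [] 0

-- ===== PORT B =====
-- identical preamble, then n = count if count > 0 else 0, and
-- base * (n // len(base)) + base[:n % len(base)]  (n ≥ 0, len(base) > 0, so Python's
-- // and % agree with Nat division/mod and the slice is List.take).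
def next_slots_alt (slots : String) (count : Int) : List String :=
  let base := (((PySem.Str.split? slots "|").getD []).map PySem.Str.strip).filter (fun s => !(s == ""))
  let base := if base = [] then ["03:00 AM", "09:00 AM", "07:00 PM"] else base
  let n : Nat := (if count > 0 then count else 0).toNat
  (List.replicate (n / base.length) base).flatten ++ base.take (n % base.length)

-- ===== PRECONDITION & SPEC =====
def Spec_next_slots (slots : String) (count : Int) (out : List String) : Prop := out = next_slots_alt slots count
instance (slots : String) (count : Int) (out : List String) : Decidable (Spec_next_slots slots count out) := by unfold Spec_next_slots; infer_instance

-- ===== CLAIM (what is proved, stated in full; the proofs are below) =====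
def Claim_equal_next_slots : Prop := ∀ (slots : String) (count : Int), Dom_next_slots slots count → Spec_next_slots slots count (next_slots slots count)

-- ===== LEMMAS AND PROOFS =====

-- the first l.length entries of the cyclic indexing enumerate l itself
theorem map_range_getD (l : List String) :
    (List.range l.length).map (fun j => l.getD j "") = l := by
  apply List.ext_getElem
  · simp
  · intro i h1 h2
    simp [List.getD_eq_getElem?_getD, h2]

theorem take_eq_map_range (l : List String) (n : Nat) (h : n ≤ l.length) :
    l.take n = (List.range n).map (fun j => l.getD j "") := by
  apply List.ext_getElem
  · simp; omega
  · intro i h1 h2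
    simp at h1
    obtain ⟨hin, hil⟩ := h1
    simp [List.getD_eq_getElem?_getD, hil]

-- the loop produces out followed by k cyclic entries starting at index i
-- (k = remaining iterations, never more than the fuel)
theorem loopA_eq (base : List String) (count : Int) :
    ∀ (fuel k : Nat) (out : List String) (i : Nat),
    (count - out.length).toNat = k → k ≤ fuel →
    nextSlotsLoopA base count fuel out i =
      out ++ (List.range k).map (fun j => base.getD ((i + j) % base.length) "") := by
  intro fuel
  induction fuel with
  | zero =>
    intro k out i hk hle
    interval_cases k
    simp [nextSlotsLoopA]
  | succ fuel ih =>
    intro k out i hk hle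
    match k, hk with
    | 0, hk =>
      rw [nextSlotsLoopA]
      simp only [List.range_zero, List.map_nil, List.append_nil]
      rw [if_neg]; omega
    | k + 1, hk =>
      rw [nextSlotsLoopA, if_pos (by omega)]
      rw [ih k (out ++ [base.getD (i % base.length) ""]) (i + 1) (by simp; omega)
        (by omega)]
      have hsplit : (List.range (k + 1)).map
            (fun j => base.getD ((i + j) % base.length) "")
          = base.getD (i % base.length) "" ::
            (List.range k).map (fun j => base.getD ((i + 1 + j) % base.length) "") := by
        rw [List.range_succ_eq_map, List.map_cons, List.map_map]
        refine congrArg₂ _ (by simp) (List.map_congr_left ?_)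
        intro a _
        simp only [Function.comp_apply]
        congr 1
        congr 1
        omega
      rw [hsplit, List.append_assoc, List.singleton_append]

-- the closed form equals the same cyclic enumeration
theorem closed_eq (base : List String) (hb : base ≠ []) :
    ∀ n : Nat,
    (List.replicate (n / base.length) base).flatten ++ base.take (n % base.length) =
      (List.range n).map (fun j => base.getD (j % base.length) "") := by
  have hL : 0 < base.length := List.length_pos_iff.mpr hb
  intro n
  induction n using Nat.strong_induction_on with
  | _ n ih =>
    by_cases h : n < base.length
    · rw [Nat.div_eq_of_lt h, Nat.mod_eq_of_lt h]
      simp only [List.replicate_zero, List.flatten_nil, List.nil_append]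
      rw [take_eq_map_range base n (le_of_lt h)]
      apply List.map_congr_left
      intro j hj
      simp at hj
      rw [Nat.mod_eq_of_lt (hj.trans h)]
    · rw [not_lt] at h
      obtain ⟨m, rfl⟩ : ∃ m, n = base.length + m := ⟨n - base.length, by omega⟩
      have hdiv : (base.length + m) / base.length = m / base.length + 1 := by
        rw [Nat.add_comm, Nat.add_div_right _ hL]
      have hmod : (base.length + m) % base.length = m % base.length := by
        rw [Nat.add_comm, Nat.add_mod_right]
      rw [hdiv, hmod, List.replicate_succ, List.flatten_cons, List.append_assoc,
        ih m (by omega), List.range_add, List.map_append, List.map_map]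
      congr 1
      · have h1 : ∀ j ∈ List.range base.length,
            base.getD (j % base.length) "" = base.getD j "" := by
          intro j hj
          rw [Nat.mod_eq_of_lt (List.mem_range.mp hj)]
        rw [List.map_congr_left h1, map_range_getD]
      · apply List.map_congr_left
        intro j hj
        simp [Function.comp, Nat.add_mod_left]

theorem main_eq (base : List String) (hb : base ≠ []) (count : Int) :
    nextSlotsLoopA base count count.toNat [] 0 =
      (List.replicate ((if count > 0 then count else 0).toNat / base.length) base).flatten ++
        base.take ((if count > 0 then count else 0).toNat % base.length) := by
  have hn : (if count > 0 then count else 0).toNat = count.toNat := by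
    split_ifs <;> omega
  rw [hn, closed_eq base hb count.toNat,
    loopA_eq base count count.toNat count.toNat [] 0 (by simp) (le_refl _)]
  simp

-- ===== VERDICT (by name: the statement is the Claim_ definition above) =====
theorem next_slots_spec : Claim_equal_next_slots := by
  intro slots count _
  unfold Spec_next_slots next_slots next_slots_alt
  set b0 := (((PySem.Str.split? slots "|").getD []).map PySem.Str.strip).filter (fun s => !(s == "")) with hb0
  by_cases h : b0 = []
  · simp only [h, if_pos]
    exact main_eq _ (by simp) count
  · simp only [if_neg h]
    exact main_eq _ h count
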